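-- pv_equiv track=rewrite | github.com/katsanyi/aoc2023 | aoc13.py | get_axes_s
-- ===== SOURCE A (Python) =====
-- def is_symmetric(s,p):
--     if p <= 0 or p >= len(s):
--         return False
--     l = min(p, len(s) - p)
--     for i in range(l):
--         if s[p-i-1] != s[p+i]:
--             return False
--     return True
--
-- def get_axes_s(s):
--     if len(s) <= 1:
--         return []
--     ret = []
--     for i in range(1, len(s)):
--         if is_symmetric(s,i):
--             ret.append(i)
--     return ret
-- ===== SOURCE B (Python) =====
-- def get_axes_s(s):
--     n = len(s)
--     return [p for p in range(1, n)
--             if s[max(0, 2 * p - n):p] == s[p:2 * p][::-1]]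
-- ===== Notes on version B (the rewrite author's own statement) =====
-- stated objective: alternative
-- what changed: B replaces the helper with an explicit index-by-index mirror loop (early return on first mismatch) by a single filter comprehension that tests each fold position with one clamped-slice/reversed-slice equality s[max(0,2p-n):p] == s[p:2p][::-1], with no separate length computation and no per-character indexing.
import Mathlib
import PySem

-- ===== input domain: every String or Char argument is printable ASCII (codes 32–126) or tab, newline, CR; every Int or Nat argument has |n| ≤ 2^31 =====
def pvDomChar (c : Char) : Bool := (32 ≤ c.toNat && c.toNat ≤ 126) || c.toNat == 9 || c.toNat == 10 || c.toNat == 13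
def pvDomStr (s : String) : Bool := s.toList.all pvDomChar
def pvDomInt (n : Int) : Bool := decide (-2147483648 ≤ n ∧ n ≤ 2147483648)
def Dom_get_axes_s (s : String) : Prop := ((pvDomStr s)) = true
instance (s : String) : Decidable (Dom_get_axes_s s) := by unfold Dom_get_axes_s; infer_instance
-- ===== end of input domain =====

-- B replaces A's per-position index-by-index mirror loop (helper with early return) by one
-- clamped-slice / reversed-slice equality per fold position inside a filter comprehension
-- (alternative decomposition, same worst-case cost).

-- ===== PORT A =====
def pvIsSymmetric (cs : List Char) (p : Int) : Bool :=
  if p ≤ 0 || PySem.List.len cs ≤ p then false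
  else
    let l : Int := min p (PySem.List.len cs - p)
    (PySem.List.pyRange 0 l 1).all (fun i =>
      PySem.List.pyGet? cs (p - i - 1) == PySem.List.pyGet? cs (p + i))

def get_axes_s (s : String) : List Int :=
  if PySem.List.len s.toList ≤ 1 then []
  else
    (PySem.List.pyRange 1 (PySem.List.len s.toList) 1).foldl
      (fun ret i => if pvIsSymmetric s.toList i then ret ++ [i] else ret) []

-- ===== PORT B =====
def get_axes_s_alt (s : String) : List Int :=
  let cs := s.toList
  let n : Int := PySem.List.len cs
  -- s[p:2*p][::-1] is ported as .reverse of the slice (PySem.List.slice?_none_none_neg_one)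
  (PySem.List.pyRange 1 n 1).filter (fun p =>
    PySem.List.slice cs (some (max 0 (2 * p - n))) (some p)
      == (PySem.List.slice cs (some p) (some (2 * p))).reverse)

-- ===== PRECONDITION & SPEC =====
def Spec_get_axes_s (s : String) (out : List Int) : Prop := out = get_axes_s_alt s
instance (s : String) (out : List Int) : Decidable (Spec_get_axes_s s out) := by unfold Spec_get_axes_s; infer_instance

-- ===== CLAIM (what is proved, stated in full; the proofs are below) =====
def Claim_equal_get_axes_s : Prop := ∀ (s : String), Dom_get_axes_s s → Spec_get_axes_s s (get_axes_s s)

-- ===== LEMMAS AND PROOFS =====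

-- the reversed-slice equality is exactly the family of mirror equations A's inner loop checks
lemma pv_slice_eq_iff (cs : List Char) (m L : Nat) (hLm : L ≤ m) (hLr : m + L ≤ cs.length) :
    (cs.drop (m - L)).take L = ((cs.drop m).take L).reverse ↔
      ∀ i (_ : i < L), cs[m - 1 - i]'(by omega) = cs[m + i]'(by omega) := by
  have hl1 : ((cs.drop (m - L)).take L).length = L := by
    simp [List.length_take, List.length_drop]; omega
  have hl2 : ((((cs.drop m).take L)).reverse).length = L := by
    simp [List.length_take, List.length_drop]; omega
  have key : ∀ (k : Nat) (hk : k < L),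
      ((cs.drop (m - L)).take L)[k]'(by omega) = cs[m - L + k]'(by omega) ∧
      (((cs.drop m).take L).reverse)[k]'(by omega) = cs[m + (L - 1 - k)]'(by omega) := by
    intro k hk
    constructor
    · simp [List.getElem_take, List.getElem_drop]
    · rw [List.getElem_reverse]
      simp only [List.getElem_take, List.getElem_drop]
      congr 1
      simp [List.length_take, List.length_drop]
      omega
  constructor
  · intro h j hj
    have hk : L - 1 - j < L := by omega
    have := List.getElem_of_eq h (show L - 1 - j < ((cs.drop (m - L)).take L).length by omega)
    rw [(key _ hk).1] at this
    rw [(key _ hk).2] at this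
    have e1 : m - L + (L - 1 - j) = m - 1 - j := by omega
    have e2 : L - 1 - (L - 1 - j) = j := by omega
    simp only [e1, e2] at this
    exact this
  · intro h
    apply List.ext_getElem (by omega)
    intro k h1 h2
    rw [(key k (by omega)).1, (key k (by omega)).2]
    have e1 : m - L + k = m - 1 - (L - 1 - k) := by omega
    simp only [e1]
    exact h (L - 1 - k) (by omega)

-- at every position 1 ≤ m < len, A's symmetry test equals B's slice test
lemma pv_sym_eq (cs : List Char) (m : Nat) (h1 : 1 ≤ m) (h2 : m < cs.length) :
    pvIsSymmetric cs (m : Int) =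
      (PySem.List.slice cs (some (max 0 (2 * (m : Int) - PySem.List.len cs))) (some (m : Int))
        == (PySem.List.slice cs (some (m : Int)) (some (2 * (m : Int)))).reverse) := by
  set N := cs.length with hN
  set L := min m (N - m) with hL
  rw [Bool.eq_iff_iff]
  unfold pvIsSymmetric
  rw [if_neg (by simp [PySem.List.len_eq]; omega)]
  have hmin : min (m : Int) (PySem.List.len cs - m) = (L : Int) := by
    simp [PySem.List.len_eq, hL]; omega
  rw [hmin]
  show ((PySem.List.pyRange 0 (L:Int)).all _) = true ↔ _
  rw [PySem.List.pyRange_zero_nat]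
  have hmax : max 0 (2 * (m : Int) - PySem.List.len cs) = ((m - L : Nat) : Int) := by
    simp [PySem.List.len_eq, hL]; omega
  have h2m : (2 * (m : Int)) = ((2 * m : Nat) : Int) := by push_cast; ring
  rw [hmax, h2m, PySem.List.slice_natCast, PySem.List.slice_natCast]
  have ht1 : m - (m - L) = L := by omega
  have ht2 : (cs.drop m).take (2 * m - m) = (cs.drop m).take L := by
    rcases Nat.le_total m (N - m) with hc | hc
    · have : L = m := by omega
      rw [this]; congr 1; omega
    · have hLe : L = N - m := by omega
      have hlen : (cs.drop m).length = L := by simp [List.length_drop]; omega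
      rw [List.take_of_length_le (by omega), ← hlen, List.take_length]
  rw [ht1, ht2, beq_iff_eq, pv_slice_eq_iff cs m L (by omega) (by omega)]
  rw [List.all_map, List.all_eq_true]
  constructor
  · intro h i hi
    have := h i (List.mem_range.mpr hi)
    simp only [Function.comp] at this
    have e1 : (m : Int) - i - 1 = ((m - 1 - i : Nat) : Int) := by omega
    have e2 : (m : Int) + i = ((m + i : Nat) : Int) := by omega
    rw [e1, e2, PySem.List.pyGet?_natCast, PySem.List.pyGet?_natCast] at this
    rw [List.getElem?_eq_getElem (by omega), List.getElem?_eq_getElem (by omega)] at this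
    simpa using this
  · intro h i hi
    have hi' : i < L := List.mem_range.mp hi
    simp only [Function.comp]
    have e1 : (m : Int) - i - 1 = ((m - 1 - i : Nat) : Int) := by omega
    have e2 : (m : Int) + i = ((m + i : Nat) : Int) := by omega
    rw [e1, e2, PySem.List.pyGet?_natCast, PySem.List.pyGet?_natCast]
    rw [List.getElem?_eq_getElem (by omega), List.getElem?_eq_getElem (by omega)]
    simpa using h i hi'

-- ===== VERDICT (by name: the statement is the Claim_ definition above) =====
theorem get_axes_s_spec : Claim_equal_get_axes_s := by
  intro s _
  unfold Spec_get_axes_s get_axes_s get_axes_s_alt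
  dsimp only
  set cs := s.toList with hcs
  by_cases hle : PySem.List.len cs ≤ 1
  · rw [if_pos hle, PySem.List.pyRange_one_eq_nil hle, List.filter_nil]
  · rw [if_neg hle, PySem.List.foldl_append_if_eq_filter, List.nil_append]
    apply List.filter_congr
    intro p hp
    rw [PySem.List.mem_pyRange_one] at hp
    have hlen : PySem.List.len cs = (cs.length : Int) := PySem.List.len_eq cs
    have hm : p = ((p.toNat : Nat) : Int) := by omega
    rw [hm]
    exact pv_sym_eq cs p.toNat (by omega) (by rw [hlen] at hp; omega)
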